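-- pv_equiv track=rewrite | github.com/MicheleDaniele/IntentGraph | src/intentgraph/adapters/parsers/base.py | _is_valid_import_path
-- ===== SOURCE A (Python) =====
-- def _is_valid_import_path(import_path: str) -> bool:
--     """Validate import path format to prevent injection."""
--     # Check for null bytes and control characters
--     if '\x00' in import_path or any(ord(c) < 32 for c in import_path if c not in '\t\n'):
--         return False
--
--     # Check length limits
--     if len(import_path) > 1000:  # Reasonable limit
--         return False
--
--     # Check for excessive relative traversal
--     if import_path.count('..') > 10:  # Reasonable limit
--         return False
--
--     # Must not be empty or whitespace only
--     if not import_path.strip():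
--         return False
--
--     return True
-- ===== SOURCE B (Python) =====
-- def _is_valid_import_path(import_path: str) -> bool:
--     """Validate import path format to prevent injection (single-pass)."""
--     bad_char = False
--     dotdot = 0
--     prev_dot = False
--     has_nonws = False
--     n = 0
--     for c in import_path:
--         n += 1
--         if ord(c) < 32 and c not in '\t\n':
--             bad_char = True
--         if c == '.':
--             if prev_dot:
--                 dotdot += 1
--                 prev_dot = False
--             else:
--                 prev_dot = True
--         else:
--             prev_dot = False
--         if not c.isspace():
--             has_nonws = True
--     return (not bad_char) and n <= 1000 and dotdot <= 10 and has_nonws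
-- ===== Notes on version B (the rewrite author's own statement) =====
-- stated objective: alternative
-- what changed: Replaces four separate scans (null/control check, len, str.count('..'), str.strip()) by one state-machine pass that tracks a bad-character flag, a non-overlapping '..' counter via a previous-dot flag, a non-whitespace flag and the length, combined once at the end.
import Mathlib
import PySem

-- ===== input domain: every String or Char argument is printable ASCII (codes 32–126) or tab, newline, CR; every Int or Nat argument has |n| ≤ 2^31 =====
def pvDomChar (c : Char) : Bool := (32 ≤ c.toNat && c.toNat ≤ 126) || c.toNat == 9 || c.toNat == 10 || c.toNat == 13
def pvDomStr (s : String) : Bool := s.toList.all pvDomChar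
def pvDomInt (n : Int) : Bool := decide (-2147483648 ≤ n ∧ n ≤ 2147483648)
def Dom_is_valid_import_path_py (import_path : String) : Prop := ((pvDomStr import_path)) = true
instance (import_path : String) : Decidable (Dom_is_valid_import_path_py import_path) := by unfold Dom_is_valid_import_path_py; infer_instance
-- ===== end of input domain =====

-- B replaces A's four separate scans by a single state-machine pass; alternative decomposition, same O(n) cost.


-- ===== PORT A =====
-- literal port of A: four separate checks, early-return chain
def is_valid_import_path_py (import_path : String) : Bool :=
  -- '\x00' in import_path or any(ord(c) < 32 for c in import_path if c not in '\t\n')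
  if PySem.Str.isIn "\x00" import_path
      || import_path.toList.any (fun c => !("\t\n".toList.contains c) && decide (c.toNat < 32)) then
    false
  else if PySem.Str.len import_path > 1000 then
    false
  else if PySem.Str.count import_path ".." > 10 then
    false
  else if PySem.Str.strip import_path == "" then   -- 'not import_path.strip()'
    false
  else
    true

-- ===== PORT B =====
-- single pass of Source B: the for-loop as a tail-recursive state machine over the characters
def altLoop : List Char → Bool → Nat → Bool → Bool → Nat → Bool
  | [], badChar, dotdot, _prevDot, hasNonws, n =>
      !badChar && decide (n ≤ 1000) && decide (dotdot ≤ 10) && hasNonws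
  | c :: rest, badChar, dotdot, prevDot, hasNonws, n =>
      let badChar' := if !("\t\n".toList.contains c) && decide (c.toNat < 32) then true else badChar
      let s : Nat × Bool :=
        if c == '.' then (if prevDot then (dotdot + 1, false) else (dotdot, true))
        else (dotdot, false)
      let hasNonws' := if !(PySem.Chars.isspace c) then true else hasNonws
      altLoop rest badChar' s.1 s.2 hasNonws' (n + 1)

def is_valid_import_path_py_alt (import_path : String) : Bool :=
  altLoop import_path.toList false 0 false false 0

-- ===== PRECONDITION & SPEC =====
def Spec_is_valid_import_path_py (import_path : String) (out : Bool) : Prop := out = is_valid_import_path_py_alt import_path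
instance (import_path : String) (out : Bool) : Decidable (Spec_is_valid_import_path_py import_path out) := by unfold Spec_is_valid_import_path_py; infer_instance

-- ===== CLAIM (what is proved, stated in full; the proofs are below) =====
def Claim_equal_is_valid_import_path_py : Prop := ∀ (import_path : String), Dom_is_valid_import_path_py import_path → Spec_is_valid_import_path_py import_path (is_valid_import_path_py import_path)

-- ===== LEMMAS AND PROOFS =====

-- the character predicate of A's first guard
def ctrlChar (c : Char) : Bool := !("\t\n".toList.contains c) && decide (c.toNat < 32)

-- non-overlapping '..' count of a list, with a carried previous-dot flag
def cnt : List Char → Bool → Nat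
  | [], _ => 0
  | c :: t, p => if c = '.' then (if p then 1 + cnt t false else cnt t true) else cnt t false

theorem altLoop_eq (l : List Char) : ∀ (badChar : Bool) (dotdot : Nat) (prevDot hasNonws : Bool) (n : Nat),
    altLoop l badChar dotdot prevDot hasNonws n =
      (!(badChar || l.any ctrlChar)
        && decide (n + l.length ≤ 1000)
        && decide (dotdot + cnt l prevDot ≤ 10)
        && (hasNonws || l.any (fun c => !(PySem.Chars.isspace c)))) := by
  induction l with
  | nil => intro badChar dotdot prevDot hasNonws n; simp [altLoop, cnt]
  | cons c t ih =>
    intro badChar dotdot prevDot hasNonws n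
    simp only [altLoop, ih, List.any_cons, ctrlChar]
    by_cases hc : c = '.'
    · subst hc
      have hsp : PySem.Chars.isspace '.' = false := by decide
      cases prevDot with
      | false =>
        rw [show n + 1 + t.length = n + (t.length + 1) from by omega]
        simp [cnt, hsp, Bool.and_assoc, Bool.and_comm, Bool.and_left_comm]
        rfl
      | true =>
        simp only [cnt, beq_self_eq_true, if_true]
        rw [show n + 1 + t.length = n + (t.length + 1) from by omega,
            show dotdot + 1 + cnt t false = dotdot + (1 + cnt t false) from by omega]
        simp [hsp, Bool.and_assoc, Bool.and_comm, Bool.and_left_comm]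
        rfl
    · have hbeq : (c == '.') = false := by simp [hc]
      rw [show n + 1 + t.length = n + (t.length + 1) from by omega]
      simp [hbeq, cnt, hc, Bool.and_assoc, Bool.and_comm, Bool.and_left_comm,
        Bool.or_assoc, Bool.or_comm, Bool.or_left_comm]
      rfl

theorem count_go_nil (sub : List Char) (fuel acc : Nat) :
    PySem.Chars.count.go sub fuel [] acc = acc := by
  cases fuel <;> simp [PySem.Chars.count.go]

theorem count_go_eq : ∀ (fuel : Nat) (l : List Char) (acc : Nat), l.length ≤ fuel →
    PySem.Chars.count.go ['.', '.'] fuel l acc = acc + cnt l false := by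
  intro fuel
  induction fuel with
  | zero =>
    intro l acc h
    have : l = [] := List.eq_nil_of_length_eq_zero (Nat.le_zero.mp h)
    subst this; simp [count_go_nil, cnt]
  | succ f ih =>
    intro l acc h
    cases l with
    | nil => simp [count_go_nil, cnt]
    | cons c t =>
      by_cases hc : c = '.'
      · subst hc
        cases t with
        | nil =>
          simp [PySem.Chars.count.go, cnt, List.isPrefixOf, count_go_nil]
        | cons d t' =>
          by_cases hd : d = '.'
          · subst hd
            have hpre : List.isPrefixOf ['.', '.'] ('.' :: '.' :: t') = true := by
              simp [List.isPrefixOf]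
            have hlen : t'.length ≤ f := by simp at h; omega
            have hdrop : List.drop (['.', '.'] : List Char).length ('.' :: '.' :: t') = t' := rfl
            simp only [PySem.Chars.count.go, hpre, if_pos, hdrop]
            rw [ih t' (acc + 1) hlen]
            simp [cnt]; omega
          · have hpre : List.isPrefixOf ['.', '.'] ('.' :: d :: t') = false := by
              simp [List.isPrefixOf]
              exact fun h' => absurd h'.symm hd
            have hlen : (d :: t').length ≤ f := by simpa using h
            simp only [PySem.Chars.count.go, hpre, Bool.false_eq_true, if_false]
            rw [ih (d :: t') acc hlen]
            simp [cnt, hd]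
      · have hpre : List.isPrefixOf ['.', '.'] (c :: t) = false := by
          simp [List.isPrefixOf]
          exact fun h' => absurd h'.symm hc
        have hlen : t.length ≤ f := by simpa using h
        simp only [PySem.Chars.count.go, hpre, Bool.false_eq_true, if_false]
        rw [ih t acc hlen]
        simp [cnt, hc]

theorem count_eq (l : List Char) : PySem.Chars.count l ['.', '.'] = cnt l false := by
  simp only [PySem.Chars.count, List.isEmpty_cons, Bool.false_eq_true, if_false]
  simpa using count_go_eq l.length l 0 (le_refl _)

theorem strip_nil_iff (l : List Char) : (PySem.Chars.strip l = []) ↔ (∀ c ∈ l, PySem.Chars.isspace c = true) := by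
  unfold PySem.Chars.strip PySem.Chars.rstrip PySem.Chars.lstrip
  constructor
  · intro h c hc
    have h' : ∀ x ∈ List.dropWhile PySem.Chars.isspace l, PySem.Chars.isspace x = true := by
      intro x hx
      have := List.dropWhile_eq_nil_iff.mp (by simpa using h)
      exact this x (by simpa using hx)
    rcases List.mem_append.mp (by rw [List.takeWhile_append_dropWhile]; exact hc :
        c ∈ List.takeWhile PySem.Chars.isspace l ++ List.dropWhile PySem.Chars.isspace l) with h1 | h2
    · exact List.mem_takeWhile_imp h1
    · exact h' c h2
  · intro h
    have h1 : List.dropWhile PySem.Chars.isspace l = [] :=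
      List.dropWhile_eq_nil_iff.mpr h
    simp [h1]

theorem null_in_any (s : String) (h : PySem.Str.isIn "\x00" s = true) :
    s.toList.any ctrlChar = true := by
  have hinf := (PySem.Str.isIn_iff_infix _ _).mp h
  have hmem : '\x00' ∈ s.toList := by
    have h0 : '\x00' ∈ ("\x00" : String).toList := by decide
    exact hinf.subset h0
  exact List.any_eq_true.mpr ⟨'\x00', hmem, by decide⟩

-- ===== VERDICT (by name: the statement is the Claim_ definition above) =====
theorem is_valid_import_path_py_spec : Claim_equal_is_valid_import_path_py := by
  intro s _
  unfold Spec_is_valid_import_path_py is_valid_import_path_py_alt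
  rw [altLoop_eq]
  unfold is_valid_import_path_py
  by_cases h0 : s.toList.any ctrlChar = true
  · have h0' : s.toList.any (fun c => !("\t\n".toList.contains c) && decide (c.toNat < 32)) = true := h0
    rw [if_pos (by rw [h0']; simp), h0]
    simp
  · simp only [Bool.not_eq_true] at h0
    have hnull : PySem.Str.isIn "\x00" s = false := by
      cases hI : PySem.Str.isIn "\x00" s
      · rfl
      · exact absurd (null_in_any s hI) (by simp [h0])
    have h0' : s.toList.any (fun c => !("\t\n".toList.contains c) && decide (c.toNat < 32)) = false := h0
    rw [hnull, h0']
    simp only [Bool.or_false, Bool.false_eq_true, if_false, h0, Bool.not_false, Bool.true_and]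
    have hcnt : PySem.Str.count s ".." = cnt s.toList false := by
      have h2 : ("..").toList = ['.', '.'] := by decide
      simp [PySem.Str.count, h2, count_eq]
    by_cases hl : s.toList.length ≤ 1000
    · rw [if_neg (by rw [PySem.Str.len_eq]; omega)]
      by_cases hcount : cnt s.toList false ≤ 10
      · rw [if_neg (by rw [hcnt]; omega)]
        by_cases hws : s.toList.any (fun c => !(PySem.Chars.isspace c)) = true
        · have hstrip : PySem.Chars.strip s.toList ≠ [] := by
            intro hnil
            rcases List.any_eq_true.mp hws with ⟨c, hcmem, hcns⟩
            have := (strip_nil_iff s.toList).mp hnil c hcmem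
            simp [this] at hcns
          rw [if_neg (by simp [PySem.Str.strip, hstrip])]
          have hl' : s.length ≤ 1000 := by simpa using hl
          simp [hl', hcount, hws]
        · simp only [Bool.not_eq_true] at hws
          have hall : ∀ c ∈ s.toList, PySem.Chars.isspace c = true := by
            intro c hcmem
            by_contra hcns
            have hx : s.toList.any (fun c => !(PySem.Chars.isspace c)) = true :=
              List.any_eq_true.mpr ⟨c, hcmem, by simp [hcns]⟩
            simp [hx] at hws
          have hstrip : PySem.Chars.strip s.toList = [] := (strip_nil_iff s.toList).mpr hall
          rw [if_pos (by simp [PySem.Str.strip, hstrip])]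
          simp [hws]
      · rw [if_pos (by rw [hcnt]; omega)]
        simp [hcount]
    · rw [if_pos (by rw [PySem.Str.len_eq]; omega)]
      have hl' : ¬ s.length ≤ 1000 := by simpa using hl
      simp [hl']
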